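-- pv_equiv track=rewrite | github.com/purplecurry/prj-toti | ai_service.py | calculate_total_minutes
-- ===== SOURCE A (Python) =====
-- from enum import Enum
--
-- class StudyType(str, Enum):
--     memorization = "memorization"        # 암기형
--     comprehension = "comprehension"      # 이해형
--     problem_solving = "problem_solving"  # 문제풀이형
--     practice = "practice"                # 실습형
--
-- LONG_BREAK_MINUTES = 30
--
-- LONG_BREAK_THRESHOLD_MINUTES = 120
--
-- def calculate_total_minutes(
--     study_type: StudyType,
--     study_minutes: int,
--     short_break_minutes: int,
--     num_sessions: int,
--     include_long_break: bool,
-- ) -> int: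
--     total = 0
--     accumulated_minutes = 0
--
--     for i in range(1, num_sessions + 1):
--         total += study_minutes
--         accumulated_minutes += study_minutes
--
--         total += short_break_minutes
--         accumulated_minutes += short_break_minutes
--
--         if include_long_break and i < num_sessions and accumulated_minutes >= LONG_BREAK_THRESHOLD_MINUTES:
--             total += LONG_BREAK_MINUTES
--             accumulated_minutes = 0
--
--     return total
-- ===== SOURCE B (Python) =====
-- LONG_BREAK_MINUTES = 30
-- LONG_BREAK_THRESHOLD_MINUTES = 120
--
-- def calculate_total_minutes(
--     study_type,
--     study_minutes,
--     short_break_minutes,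
--     num_sessions,
--     include_long_break,
-- ):
--     # Closed form: every session contributes study+short break; a long break is
--     # inserted after every `period`-th session (except the last), where `period`
--     # is the number of sessions needed to accumulate the threshold.
--     if num_sessions <= 0:
--         return 0
--     cycle = study_minutes + short_break_minutes
--     total = num_sessions * cycle
--     if include_long_break and cycle > 0:
--         period = -((-LONG_BREAK_THRESHOLD_MINUTES) // cycle)  # ceil(threshold/cycle)
--         total += LONG_BREAK_MINUTES * ((num_sessions - 1) // period)
--     return total
-- ===== Notes on version B (the rewrite author's own statement) =====
-- stated objective: faster
-- what changed: Replaced the per-session accumulation loop by an O(1) closed form: total = n*(study+break) plus 30 * floor((n-1)/ceil(120/(study+break))) long breaks (none when the per-session cycle is non-positive).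
import Mathlib
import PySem

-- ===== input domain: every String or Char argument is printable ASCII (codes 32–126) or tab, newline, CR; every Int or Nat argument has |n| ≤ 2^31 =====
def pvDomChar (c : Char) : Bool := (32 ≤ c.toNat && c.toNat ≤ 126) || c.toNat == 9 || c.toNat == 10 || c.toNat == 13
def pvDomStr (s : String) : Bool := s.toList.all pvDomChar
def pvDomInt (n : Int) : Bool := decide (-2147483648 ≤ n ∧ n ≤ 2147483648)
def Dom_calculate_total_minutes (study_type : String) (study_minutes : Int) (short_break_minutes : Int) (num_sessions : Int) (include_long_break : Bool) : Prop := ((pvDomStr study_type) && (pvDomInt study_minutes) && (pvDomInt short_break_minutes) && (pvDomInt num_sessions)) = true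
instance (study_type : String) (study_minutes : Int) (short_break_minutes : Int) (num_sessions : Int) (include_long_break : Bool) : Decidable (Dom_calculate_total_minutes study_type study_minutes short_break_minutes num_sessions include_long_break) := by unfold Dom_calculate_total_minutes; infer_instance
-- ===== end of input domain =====

-- B replaces A's per-session loop by an O(1) closed form (count of long breaks via ceiling/floor division); proved to return the same total on all inputs.


-- ===== PORT A =====
-- loop body of A: updates (total, accumulated_minutes) for session i
def ctmStep (study_minutes short_break_minutes num_sessions : Int) (include_long_break : Bool)
    (st : Int × Int) (i : Int) : Int × Int :=
  let total := st.1 + study_minutes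
  let acc := st.2 + study_minutes
  let total := total + short_break_minutes
  let acc := acc + short_break_minutes
  if include_long_break = true ∧ i < num_sessions ∧ acc ≥ 120 then (total + 30, 0)
  else (total, acc)

def calculate_total_minutes (study_type : String) (study_minutes : Int) (short_break_minutes : Int) (num_sessions : Int) (include_long_break : Bool) : Int :=
  ((PySem.List.pyRange 1 (num_sessions + 1) 1).foldl
    (ctmStep study_minutes short_break_minutes num_sessions include_long_break) (0, 0)).1

-- ===== PORT B =====
def calculate_total_minutes_alt (study_type : String) (study_minutes : Int) (short_break_minutes : Int) (num_sessions : Int) (include_long_break : Bool) : Int :=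
  if num_sessions ≤ 0 then 0
  else
    let cycle := study_minutes + short_break_minutes
    let total := num_sessions * cycle
    if include_long_break = true ∧ cycle > 0 then
      let period := -(PySem.Int.floordiv (-(120 : Int)) cycle)
      total + 30 * PySem.Int.floordiv (num_sessions - 1) period
    else total

-- ===== PRECONDITION & SPEC =====
def Spec_calculate_total_minutes (study_type : String) (study_minutes : Int) (short_break_minutes : Int) (num_sessions : Int) (include_long_break : Bool) (out : Int) : Prop := out = calculate_total_minutes_alt study_type study_minutes short_break_minutes num_sessions include_long_break
instance (study_type : String) (study_minutes : Int) (short_break_minutes : Int) (num_sessions : Int) (include_long_break : Bool) (out : Int) : Decidable (Spec_calculate_total_minutes study_type study_minutes short_break_minutes num_sessions include_long_break out) := by unfold Spec_calculate_total_minutes; infer_instance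

-- ===== CLAIM (what is proved, stated in full; the proofs are below) =====
def Claim_equal_calculate_total_minutes : Prop := ∀ (study_type : String) (study_minutes : Int) (short_break_minutes : Int) (num_sessions : Int) (include_long_break : Bool), Dom_calculate_total_minutes study_type study_minutes short_break_minutes num_sessions include_long_break → Spec_calculate_total_minutes study_type study_minutes short_break_minutes num_sessions include_long_break (calculate_total_minutes study_type study_minutes short_break_minutes num_sessions include_long_break)

-- ===== LEMMAS AND PROOFS =====

-- When no long break can ever fire (flag off, or non-positive cycle), the state after k sessions is (k*c, k*c).
theorem ctm_inv_nobreak (s b n : Int) (lb : Bool)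
    (h : lb = false ∨ s + b ≤ 0) (k : Nat) :
    (PySem.List.pyRange 1 ((k : Int) + 1) 1).foldl (ctmStep s b n lb) (0, 0)
      = ((k : Int) * (s + b), (k : Int) * (s + b)) := by
  induction k with
  | zero => rw [PySem.List.pyRange_one_eq_nil (by omega)]; simp
  | succ k ih =>
    have h1 : (1 : Int) ≤ (k : Int) + 1 := by omega
    have hcast : ((k + 1 : Nat) : Int) + 1 = ((k : Int) + 1) + 1 := by push_cast; ring
    rw [hcast, PySem.List.pyRange_one_succ_right h1, List.foldl_append, ih]
    have hcond : ¬ (lb = true ∧ (k : Int) + 1 < n ∧ (k : Int) * (s + b) + s + b ≥ 120) := by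
      rcases h with h | h
      · rintro ⟨h1, -⟩; simp [h] at h1
      · rintro ⟨-, -, h3⟩
        have he : (k : Int) * (s + b) + s + b = ((k : Int) + 1) * (s + b) := by ring
        rw [he] at h3
        have hk1 : (0 : Int) ≤ (k : Int) + 1 := by omega
        nlinarith
    simp only [List.foldl, ctmStep]
    rw [if_neg (by exact fun hc => hcond ⟨hc.1, hc.2.1, by linarith [hc.2.2]⟩)]
    simp only [Prod.mk.injEq]
    constructor <;> (push_cast; ring)

-- Break case: with c > 0 and p = ceil(120/c), after k sessions (all with index < n) the
-- state is (k*c + 30*(k/p), (k % p)*c), divisions being Int's ediv/emod.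
theorem ctm_inv_break (s b n : Int) (hc : 0 < s + b)
    (p : Int) (hp : 1 ≤ p) (hpc : 120 ≤ p * (s + b)) (hpc' : (p - 1) * (s + b) < 120)
    (k : Nat) (hk : (k : Int) ≤ n - 1) :
    (PySem.List.pyRange 1 ((k : Int) + 1) 1).foldl (ctmStep s b n true) (0, 0)
      = ((k : Int) * (s + b) + 30 * ((k : Int) / p), ((k : Int) % p) * (s + b)) := by
  induction k with
  | zero =>
    rw [PySem.List.pyRange_one_eq_nil (by omega)]
    simp
  | succ k ih =>
    have hk' : (k : Int) ≤ n - 1 := by push_cast at hk ⊢; omega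
    have h1 : (1 : Int) ≤ (k : Int) + 1 := by omega
    have hcast : ((k + 1 : Nat) : Int) + 1 = ((k : Int) + 1) + 1 := by push_cast; ring
    rw [hcast, PySem.List.pyRange_one_succ_right h1, List.foldl_append, ih hk']
    have hpne : p ≠ 0 := by omega
    have hm0 : 0 ≤ (k : Int) % p := Int.emod_nonneg _ hpne
    have hmp : (k : Int) % p < p := Int.emod_lt_of_pos _ (by omega)
    have hdm : p * ((k : Int) / p) + (k : Int) % p = (k : Int) := Int.ediv_add_emod _ _
    have hacc : ((k : Int) % p) * (s + b) + s + b = ((k : Int) % p + 1) * (s + b) := by ring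
    simp only [List.foldl, ctmStep]
    by_cases hbr : (k : Int) % p + 1 = p
    · -- long break fires after session k+1
      have hge : ((k : Int) % p) * (s + b) + s + b ≥ 120 := by rw [hacc, hbr]; linarith
      have hlt : (k : Int) + 1 < n := by push_cast at hk; omega
      rw [if_pos ⟨trivial, hlt, hge⟩]
      have hk1 : (k : Int) + 1 = p * ((k : Int) / p + 1) := by linear_combination hbr - hdm
      have hdiv : ((k + 1 : Nat) : Int) / p = (k : Int) / p + 1 := by
        push_cast; rw [hk1, Int.mul_ediv_cancel_left _ hpne]
      have hmod : ((k + 1 : Nat) : Int) % p = 0 := by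
        push_cast; rw [hk1, Int.mul_emod_right]
      rw [hdiv, hmod]
      simp only [Prod.mk.injEq]
      constructor <;> (push_cast; ring)
    · -- no long break
      have hlt120 : ((k : Int) % p + 1) * (s + b) < 120 := by
        have hle : (k : Int) % p + 1 ≤ p - 1 := by omega
        calc ((k : Int) % p + 1) * (s + b) ≤ (p - 1) * (s + b) :=
              mul_le_mul_of_nonneg_right hle (by linarith)
          _ < 120 := hpc'
      have hcond : ¬ ((k : Int) + 1 < n ∧ ((k : Int) % p) * (s + b) + s + b ≥ 120) := by
        rintro ⟨-, h3⟩; rw [hacc] at h3; linarith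
      rw [if_neg (by exact fun hcd => hcond ⟨hcd.2.1, by linarith [hcd.2.2]⟩)]
      have hk1 : (k : Int) + 1 = ((k : Int) % p + 1) + p * ((k : Int) / p) := by
        linear_combination -hdm
      have hdiv : ((k + 1 : Nat) : Int) / p = (k : Int) / p := by
        push_cast
        rw [hk1, Int.add_mul_ediv_left _ _ hpne,
          Int.ediv_eq_zero_of_lt (by omega) (by omega), zero_add]
      have hmod : ((k + 1 : Nat) : Int) % p = (k : Int) % p + 1 := by
        push_cast
        rw [hk1, Int.add_mul_emod_self_left,
          Int.emod_eq_of_lt (by omega) (by omega)]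
      rw [hdiv, hmod]
      simp only [Prod.mk.injEq]
      constructor <;> (push_cast; ring)

-- ===== VERDICT (by name: the statement is the Claim_ definition above) =====
theorem calculate_total_minutes_spec : Claim_equal_calculate_total_minutes := by
  intro st s b n lb _
  unfold Spec_calculate_total_minutes calculate_total_minutes calculate_total_minutes_alt
  by_cases hn : n ≤ 0
  · rw [if_pos hn, PySem.List.pyRange_one_eq_nil (by omega)]; rfl
  rw [if_neg hn]
  push_neg at hn
  simp only []
  by_cases hcase : lb = true ∧ 0 < s + b
  · obtain ⟨hlb, hc⟩ := hcase
    subst hlb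
    rw [if_pos ⟨rfl, hc⟩]
    -- set up p
    set p : Int := -(PySem.Int.floordiv (-(120 : Int)) (s + b)) with hpdef
    have hfd : PySem.Int.floordiv (-(120 : Int)) (s + b) = (-(120 : Int)) / (s + b) :=
      PySem.Int.floordiv_eq_ediv_of_pos hc
    have hdm : (s + b) * ((-(120 : Int)) / (s + b)) + (-(120 : Int)) % (s + b) = -(120 : Int) :=
      Int.ediv_add_emod _ _
    have hr0 : 0 ≤ (-(120 : Int)) % (s + b) := Int.emod_nonneg _ (by omega)
    have hrlt : (-(120 : Int)) % (s + b) < s + b := Int.emod_lt_of_pos _ hc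
    have hpc : 120 ≤ p * (s + b) := by rw [hpdef, hfd]; nlinarith
    have hpc' : (p - 1) * (s + b) < 120 := by rw [hpdef, hfd]; nlinarith
    have hp1 : 1 ≤ p := by nlinarith
    -- split the range at n
    have hsplit : PySem.List.pyRange 1 (n + 1) 1
        = PySem.List.pyRange 1 n 1 ++ [n] := PySem.List.pyRange_one_succ_right (by omega)
    have hkn : ((n - 1).toNat : Int) = n - 1 := Int.toNat_of_nonneg (by omega)
    have hinv := ctm_inv_break s b n hc p hp1 hpc hpc' (n - 1).toNat (by omega)
    rw [hkn] at hinv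
    have hone : n - 1 + 1 = n := by ring
    rw [hone] at hinv
    rw [hsplit, List.foldl_append, hinv]
    simp only [List.foldl, ctmStep]
    rw [if_neg (by rintro ⟨-, h2, -⟩; exact absurd h2 (lt_irrefl n))]
    rw [PySem.Int.floordiv_eq_ediv_of_pos (by omega)]
    push_cast
    ring
  · rw [if_neg hcase]
    have h : lb = false ∨ s + b ≤ 0 := by
      by_cases hlb : lb = true
      · right; by_contra hc; exact hcase ⟨hlb, by omega⟩
      · left; simp at hlb; exact hlb
    have hkn : ((n.toNat : Int)) = n := Int.toNat_of_nonneg (by omega)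
    have hinv := ctm_inv_nobreak s b n lb h n.toNat
    rw [hkn] at hinv
    rw [hinv]
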